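-- pv_equiv track=rewrite | github.com/aalto-speech/rl-klm | optimization/button_combinations.py | add_item
-- ===== SOURCE A (Python) =====
-- import copy
--
-- def add_item(row,num_items,vocab_size,max_vocab_size):
--     variations=[]
--     for name in range(vocab_size):
--         if name not in row:
--             vari=copy.copy(row)
--             vari.append(name)
--             if vocab_size<max_vocab_size and name==vocab_size-1:
--                 vocab_size=vocab_size+1
--             if len(vari)<num_items:
--                 variations=variations+add_item(vari,num_items,vocab_size,max_vocab_size)
--             else:
--                 variations.append(vari)
--     return variations
-- ===== SOURCE B (Python) =====
-- def add_item(row, num_items, vocab_size, max_vocab_size):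
--     # BFS: expand level by level; every result has length max(len(row)+1, num_items)
--     states = [(row, vocab_size)]
--     for _ in range(max(1, num_items - len(row))):
--         if not states:
--             break
--         nxt = []
--         for r, vs in states:
--             for name in range(vs):
--                 if name not in r:
--                     nxt.append((r + [name],
--                                 vs + 1 if vs < max_vocab_size and name == vs - 1 else vs))
--         states = nxt
--     return [r for r, _ in states]
-- ===== Notes on version B (the rewrite author's own statement) =====
-- stated objective: alternative
-- what changed: Replaced A's depth-first recursion (which concatenates result lists with quadratic 'variations = variations + ...') by an iterative breadth-first level expansion over a worklist of (row, vocab_size) states; since every result has the same length max(len(row)+1, num_items), the level order equals A's pre-order.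
import Mathlib
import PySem

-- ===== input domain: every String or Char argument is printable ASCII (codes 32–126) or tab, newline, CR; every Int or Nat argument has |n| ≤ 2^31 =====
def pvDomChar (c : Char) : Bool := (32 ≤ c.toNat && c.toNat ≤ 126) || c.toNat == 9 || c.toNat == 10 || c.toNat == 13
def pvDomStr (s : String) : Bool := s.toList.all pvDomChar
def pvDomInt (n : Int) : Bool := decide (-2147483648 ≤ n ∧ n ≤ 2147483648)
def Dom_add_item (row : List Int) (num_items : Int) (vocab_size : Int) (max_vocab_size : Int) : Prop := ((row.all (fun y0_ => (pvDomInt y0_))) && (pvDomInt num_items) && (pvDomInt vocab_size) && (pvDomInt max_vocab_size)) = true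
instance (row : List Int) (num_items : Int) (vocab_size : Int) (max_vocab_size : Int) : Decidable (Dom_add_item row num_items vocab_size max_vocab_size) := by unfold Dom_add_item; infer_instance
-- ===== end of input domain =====

-- B replaces A's depth-first recursion by an iterative breadth-first level expansion
-- (all results have the same length, so the per-level order equals A's pre-order); objective: alternative.

-- ===== PORT A =====
-- termination helpers for A's recursion (cited by pvLoopA's decreasing_by)
def pvCountIn (row : List Int) (K : Int) : Nat :=
  ((Finset.range K.toNat).filter (fun i : Nat => ((i : Int) ∈ row))).card

def pvM (row : List Int) (vs mx : Int) : Nat := (max vs mx).toNat - pvCountIn row (max vs mx)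

theorem pvCountIn_append (row : List Int) (K name : Int) (h0 : 0 ≤ name) (h1 : name < K)
    (h2 : name ∉ row) : pvCountIn (row ++ [name]) K = pvCountIn row K + 1 := by
  unfold pvCountIn
  have hmem : name.toNat ∈ Finset.range K.toNat := by
    simp [Finset.mem_range]; omega
  have hset : (Finset.range K.toNat).filter (fun i : Nat => ((i : Int) ∈ row ++ [name]))
      = insert name.toNat ((Finset.range K.toNat).filter (fun i : Nat => ((i : Int) ∈ row))) := by
    ext i
    simp only [Finset.mem_filter, Finset.mem_insert, List.mem_append, List.mem_singleton]
    constructor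
    · rintro ⟨hi, hr | he⟩
      · exact Or.inr ⟨hi, hr⟩
      · left; omega
    · rintro (he | ⟨hi, hr⟩)
      · subst he; exact ⟨hmem, Or.inr (by omega)⟩
      · exact ⟨hi, Or.inl hr⟩
  rw [hset, Finset.card_insert_of_notMem]
  simp only [Finset.mem_filter]
  rintro ⟨-, hr⟩
  rw [Int.toNat_of_nonneg h0] at hr
  exact h2 hr

theorem pvCountIn_lt (row : List Int) (K name : Int) (h0 : 0 ≤ name) (h1 : name < K)
    (h2 : name ∉ row) : pvCountIn row K < K.toNat := by
  unfold pvCountIn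
  have hsub : (Finset.range K.toNat).filter (fun i : Nat => ((i : Int) ∈ row)) ⊂ Finset.range K.toNat := by
    refine Finset.ssubset_iff_of_subset (Finset.filter_subset _ _) |>.mpr ?_
    refine ⟨name.toNat, by simp [Finset.mem_range]; omega, ?_⟩
    simp only [Finset.mem_filter]
    rintro ⟨-, hr⟩
    rw [Int.toNat_of_nonneg h0] at hr
    exact h2 hr
  simpa using Finset.card_lt_card hsub

theorem pvM_lt (row : List Int) (vs0 mx name vs' : Int) (h0 : 0 ≤ name) (h1 : name < vs0)
    (h2 : name ∉ row) (hv : max vs' mx = max vs0 mx) :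
    pvM (row ++ [name]) vs' mx < pvM row vs0 mx := by
  unfold pvM
  rw [hv]
  have hK : name < max vs0 mx := lt_of_lt_of_le h1 (le_max_left _ _)
  rw [pvCountIn_append row _ name h0 hK h2]
  have := pvCountIn_lt row (max vs0 mx) name h0 hK h2
  omega

theorem pvRangeBound (v : Int) : ∀ x ∈ PySem.List.pyRange 0 v 1, 0 ≤ x ∧ x < v :=
  fun x hx => by simpa using PySem.List.mem_pyRange_one.mp hx

-- A's recursion, with the for-loop as recursion on the remaining names; the running mutable
-- vocab_size is `vs`; `h`/`hv` are proof parameters used only for termination.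
def pvLoopA (row : List Int) (n vs0 mx : Int) (names : List Int) (vs : Int)
    (acc : List (List Int)) (h : ∀ x ∈ names, 0 ≤ x ∧ x < vs0)
    (hv : max vs mx = max vs0 mx) : List (List Int) :=
  match names with
  | [] => acc
  | name :: rest =>
    if hm : name ∈ row then
      pvLoopA row n vs0 mx rest vs acc (fun x hx => h x (List.mem_cons_of_mem _ hx)) hv
    else
      have hname := h name List.mem_cons_self
      let vari := row ++ [name]
      if hb : vs < mx ∧ name = vs - 1 then
        have hv' : max (vs + 1) mx = max vs0 mx := by
          rw [← hv, max_eq_right (by omega : vs + 1 ≤ mx), max_eq_right (by omega : vs ≤ mx)]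
        if (vari.length : Int) < n then
          pvLoopA row n vs0 mx rest (vs + 1)
            (acc ++ pvLoopA vari n (vs + 1) mx (PySem.List.pyRange 0 (vs + 1) 1) (vs + 1) []
              (pvRangeBound (vs + 1)) rfl)
            (fun x hx => h x (List.mem_cons_of_mem _ hx)) hv'
        else
          pvLoopA row n vs0 mx rest (vs + 1) (acc ++ [vari])
            (fun x hx => h x (List.mem_cons_of_mem _ hx)) hv'
      else
        if (vari.length : Int) < n then
          pvLoopA row n vs0 mx rest vs
            (acc ++ pvLoopA vari n vs mx (PySem.List.pyRange 0 vs 1) vs []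
              (pvRangeBound vs) rfl)
            (fun x hx => h x (List.mem_cons_of_mem _ hx)) hv
        else
          pvLoopA row n vs0 mx rest vs (acc ++ [vari])
            (fun x hx => h x (List.mem_cons_of_mem _ hx)) hv
termination_by (pvM row vs0 mx, names.length)
decreasing_by
· exact Prod.Lex.right _ (by simp)
· exact Prod.Lex.left _ _ (pvM_lt row vs0 mx name (vs + 1) hname.1 hname.2 hm hv')
· exact Prod.Lex.right _ (by simp)
· exact Prod.Lex.right _ (by simp)
· exact Prod.Lex.left _ _ (pvM_lt row vs0 mx name vs hname.1 hname.2 hm hv)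
· exact Prod.Lex.right _ (by simp)
· exact Prod.Lex.right _ (by simp)

def add_item (row : List Int) (num_items : Int) (vocab_size : Int) (max_vocab_size : Int) :
    List (List Int) :=
  pvLoopA row num_items vocab_size max_vocab_size (PySem.List.pyRange 0 vocab_size 1)
    vocab_size [] (pvRangeBound vocab_size) rfl

-- ===== PORT B =====
-- inner loop of Source B: append the admissible children of one state to nxt
def pvChildren (mx : Int) (r : List Int) (vs : Int) (nxt : List (List Int × Int)) :
    List (List Int × Int) :=
  (PySem.List.pyRange 0 vs 1).foldl
    (fun acc name =>
      if name ∈ r then acc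
      else acc ++ [(r ++ [name], if vs < mx ∧ name = vs - 1 then vs + 1 else vs)]) nxt

-- one level of Source B's BFS
def pvStep (mx : Int) (states : List (List Int × Int)) : List (List Int × Int) :=
  states.foldl (fun nxt rv => pvChildren mx rv.1 rv.2 nxt) []

-- Source B's for-loop over the levels, with the early break on an empty worklist
def pvRun (mx : Int) : Nat → List (List Int × Int) → List (List Int × Int)
  | 0, states => states
  | k + 1, states => if states = [] then states else pvRun mx k (pvStep mx states)

def add_item_alt (row : List Int) (num_items : Int) (vocab_size : Int) (max_vocab_size : Int) :
    List (List Int) :=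
  (pvRun max_vocab_size (max 1 (num_items - (row.length : Int))).toNat
    [(row, vocab_size)]).map Prod.fst

-- ===== PRECONDITION & SPEC =====
def Spec_add_item (row : List Int) (num_items : Int) (vocab_size : Int) (max_vocab_size : Int) (out : List (List Int)) : Prop := out = add_item_alt row num_items vocab_size max_vocab_size
instance (row : List Int) (num_items : Int) (vocab_size : Int) (max_vocab_size : Int) (out : List (List Int)) : Decidable (Spec_add_item row num_items vocab_size max_vocab_size out) := by unfold Spec_add_item; infer_instance

-- ===== CLAIM (what is proved, stated in full; the proofs are below) =====
def Claim_equal_add_item : Prop := ∀ (row : List Int) (num_items : Int) (vocab_size : Int) (max_vocab_size : Int), Dom_add_item row num_items vocab_size max_vocab_size → Spec_add_item row num_items vocab_size max_vocab_size (add_item row num_items vocab_size max_vocab_size)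

-- ===== LEMMAS AND PROOFS =====

-- the children of state (row, vs) named structurally (constant vs), for the proofs
def pvKids (mx : Int) (row : List Int) (vs : Int) : List Int → List (List Int × Int)
  | [] => []
  | name :: rest =>
    if name ∈ row then pvKids mx row vs rest
    else (row ++ [name], if vs < mx ∧ name = vs - 1 then vs + 1 else vs) :: pvKids mx row vs rest

theorem pvChildren_eq_kids_aux (mx : Int) (r : List Int) (vs : Int) :
    ∀ (names : List Int) (acc : List (List Int × Int)),
      names.foldl
        (fun acc name =>
          if name ∈ r then acc
          else acc ++ [(r ++ [name], if vs < mx ∧ name = vs - 1 then vs + 1 else vs)]) acc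
        = acc ++ pvKids mx r vs names := by
  intro names
  induction names with
  | nil => intro acc; simp [pvKids]
  | cons name rest ih =>
    intro acc
    simp only [List.foldl_cons, pvKids]
    by_cases hm : name ∈ r
    · simp [hm, ih]
    · simp [hm, ih]

theorem pvChildren_eq_kids (mx : Int) (r : List Int) (vs : Int) (nxt : List (List Int × Int)) :
    pvChildren mx r vs nxt = nxt ++ pvKids mx r vs (PySem.List.pyRange 0 vs 1) := by
  unfold pvChildren; exact pvChildren_eq_kids_aux mx r vs _ nxt

theorem pvKids_len (mx : Int) (row : List Int) (vs : Int) :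
    ∀ (names : List Int) (c : List Int × Int), c ∈ pvKids mx row vs names →
      c.1.length = row.length + 1 := by
  intro names
  induction names with
  | nil => simp [pvKids]
  | cons name rest ih =>
    intro c hc
    simp only [pvKids] at hc
    by_cases hm : name ∈ row
    · exact ih c (by simpa [hm] using hc)
    · simp only [hm, if_false] at hc
      rcases List.mem_cons.mp hc with h | h
      · subst h; simp
      · exact ih c h

-- A's loop with running vs = vs0, characterised by the constant-vs pvKids: the names are
-- strictly increasing and < vs0, so a vocab bump (name = vs0 - 1) forces an empty tail.
theorem pvLoopA_char_aux (n mx vs0 : Int) (row : List Int) :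
    ∀ (names : List Int), names.Pairwise (· < ·) →
    ∀ (acc : List (List Int)) (h : ∀ x ∈ names, 0 ≤ x ∧ x < vs0)
      (hv : max vs0 mx = max vs0 mx),
      pvLoopA row n vs0 mx names vs0 acc h hv
        = acc ++ (pvKids mx row vs0 names).flatMap
            (fun c => if ((row.length : Int) + 1) < n then add_item c.1 n c.2 mx else [c.1]) := by
  intro names
  induction names with
  | nil =>
    intro _ acc h hv
    rw [pvLoopA]
    simp [pvKids]
  | cons name rest ih =>
    intro hpw acc h hv
    have hpwt := (List.pairwise_cons.mp hpw).2
    have hhead := (List.pairwise_cons.mp hpw).1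
    rw [pvLoopA]
    by_cases hm : name ∈ row
    · rw [dif_pos hm]
      simp only [pvKids, if_pos hm]
      exact ih hpwt acc _ hv
    · rw [dif_neg hm]
      by_cases hb : vs0 < mx ∧ name = vs0 - 1
      · have hrest : rest = [] := by
          rcases rest with _ | ⟨y, t⟩
          · rfl
          · exfalso
            have h1 := hhead y List.mem_cons_self
            have h2 := (h y (by simp)).2
            omega
        subst hrest
        rw [dif_pos hb]
        by_cases hn : ((row ++ [name]).length : Int) < n
        · have hn' : ((row.length : Int) + 1) < n := by simpa using hn
          rw [if_pos hn, pvLoopA]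
          simp only [pvKids, if_neg hm, if_pos hb, List.flatMap_cons, List.flatMap_nil,
            List.append_nil, if_pos hn', add_item]
        · have hn' : ¬ ((row.length : Int) + 1) < n := by simpa using hn
          rw [if_neg hn, pvLoopA]
          simp [pvKids, if_neg hm, if_pos hb, if_neg hn']
      · rw [dif_neg hb]
        by_cases hn : ((row ++ [name]).length : Int) < n
        · have hn' : ((row.length : Int) + 1) < n := by simpa using hn
          rw [if_pos hn, ih hpwt _ _ hv]
          simp only [pvKids, if_neg hm, if_neg hb, List.flatMap_cons, if_pos hn',
            List.append_assoc, add_item]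
        · have hn' : ¬ ((row.length : Int) + 1) < n := by simpa using hn
          rw [if_neg hn, ih hpwt _ _ hv]
          simp [pvKids, if_neg hm, if_neg hb, if_neg hn']

theorem add_item_char (row : List Int) (n vs mx : Int) :
    add_item row n vs mx
      = (pvKids mx row vs (PySem.List.pyRange 0 vs 1)).flatMap
          (fun c => if ((row.length : Int) + 1) < n then add_item c.1 n c.2 mx else [c.1]) := by
  unfold add_item
  simpa using pvLoopA_char_aux n mx vs row (PySem.List.pyRange 0 vs 1)
    (PySem.List.pairwise_lt_pyRange_one 0 vs) [] (pvRangeBound vs) rfl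

theorem pvStep_eq_flatMap (mx : Int) (states : List (List Int × Int)) :
    pvStep mx states = states.flatMap (fun rv => pvKids mx rv.1 rv.2 (PySem.List.pyRange 0 rv.2 1)) := by
  unfold pvStep
  have : (fun (nxt : List (List Int × Int)) (rv : List Int × Int) => pvChildren mx rv.1 rv.2 nxt)
      = fun nxt rv => nxt ++ pvKids mx rv.1 rv.2 (PySem.List.pyRange 0 rv.2 1) := by
    funext nxt rv; exact pvChildren_eq_kids mx rv.1 rv.2 nxt
  rw [this]
  simpa using PySem.List.foldl_append_eq_flatMap
    (fun rv : List Int × Int => pvKids mx rv.1 rv.2 (PySem.List.pyRange 0 rv.2 1)) states []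

theorem pvStep_append (mx : Int) (s t : List (List Int × Int)) :
    pvStep mx (s ++ t) = pvStep mx s ++ pvStep mx t := by
  simp [pvStep_eq_flatMap]

theorem pvIter_nil (mx : Int) (m : Nat) : (pvStep mx)^[m] [] = [] := by
  induction m with
  | zero => rfl
  | succ m ih => rw [Function.iterate_succ_apply, pvStep_eq_flatMap]; simpa using ih

theorem pvIter_append (mx : Int) (m : Nat) :
    ∀ (s t : List (List Int × Int)), (pvStep mx)^[m] (s ++ t) = (pvStep mx)^[m] s ++ (pvStep mx)^[m] t := by
  induction m with
  | zero => intro s t; rfl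
  | succ m ih => intro s t; rw [Function.iterate_succ_apply, pvStep_append, ih,
      Function.iterate_succ_apply, Function.iterate_succ_apply]

theorem pvIter_flatMap (mx : Int) (m : Nat) (l : List (List Int × Int)) :
    (pvStep mx)^[m] l = l.flatMap (fun c => (pvStep mx)^[m] [c]) := by
  induction l with
  | nil => simpa using pvIter_nil mx m
  | cons c l ih =>
    have : c :: l = [c] ++ l := rfl
    rw [this, pvIter_append, ih]; simp

theorem pv_main (n mx : Int) :
    ∀ (k : Nat) (row : List Int) (vs : Int), (max 1 (n - (row.length : Int))).toNat = k →
      add_item row n vs mx = ((pvStep mx)^[k] [(row, vs)]).map Prod.fst := by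
  intro k
  induction k with
  | zero =>
    intro row vs hk
    have h1 : (1 : Int) ≤ max 1 (n - (row.length : Int)) := le_max_left _ _
    omega
  | succ k ih =>
    intro row vs hk
    rw [add_item_char, Function.iterate_succ_apply]
    have hstep : pvStep mx [(row, vs)] = pvKids mx row vs (PySem.List.pyRange 0 vs 1) := by
      simp [pvStep_eq_flatMap]
    rw [hstep, pvIter_flatMap, List.map_flatMap]
    by_cases hlt : ((row.length : Int) + 1) < n
    · have hmax : max 1 (n - (row.length : Int)) = n - (row.length : Int) :=
        max_eq_right (by omega)
      have hkeq : n - (row.length : Int) = (k : Int) + 1 := by omega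
      refine List.flatMap_congr (fun c hc => ?_)
      have hlen := pvKids_len mx row vs _ c hc
      have hk' : (max 1 (n - (c.1.length : Int))).toNat = k := by
        rw [hlen]
        have : n - ((row.length : Int) + 1) = (k : Int) := by omega
        have hk1 : (1 : Int) ≤ (k : Int) := by omega
        rw [show ((row.length + 1 : Nat) : Int) = (row.length : Int) + 1 by push_cast; ring,
          this, max_eq_right hk1]
        simp
      rw [if_pos hlt, ih c.1 c.2 hk']
    · have hk0 : k = 0 := by
        have : max 1 (n - (row.length : Int)) = 1 := max_eq_left (by omega)
        omega
      subst hk0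
      refine List.flatMap_congr (fun c hc => ?_)
      rw [if_neg hlt]
      simp

theorem pvRun_eq_iterate (mx : Int) :
    ∀ (k : Nat) (states : List (List Int × Int)), pvRun mx k states = (pvStep mx)^[k] states := by
  intro k
  induction k with
  | zero => intro states; rfl
  | succ k ih =>
    intro states
    rw [pvRun, Function.iterate_succ_apply]
    by_cases hs : states = []
    · subst hs
      have hnil : pvStep mx [] = [] := by simp [pvStep]
      rw [hnil, pvIter_nil]
      simp
    · rw [if_neg hs, ih]

-- ===== VERDICT (by name: the statement is the Claim_ definition above) =====
theorem add_item_spec : Claim_equal_add_item := by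
  intro row n vs mx _
  unfold Spec_add_item add_item_alt
  rw [pvRun_eq_iterate]
  exact pv_main n mx _ row vs rfl
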